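-- pv_equiv track=rewrite | github.com/mrpep/encodecmae-to-wav | encodecmae_to_wav/helpers.py | identify_state_dict_version
-- ===== SOURCE A (Python) =====
-- def identify_state_dict_version(sd):
--     version = None
--     for k,v in sd.items():
--         if 'wav_encoder.model' in k:
--             version = '1'
--         elif 'wav_encoder.encoder' in k:
--             version = '2'
--     return version
-- ===== SOURCE B (Python) =====
-- def identify_state_dict_version(sd):
--     for k, v in reversed(list(sd.items())):
--         if 'wav_encoder.model' in k:
--             return '1'
--         if 'wav_encoder.encoder' in k:
--             return '2'
--     return None
-- ===== Notes on version B (the rewrite author's own statement) =====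
-- stated objective: simpler
-- what changed: Replaces the forward full scan with a last-value override variable by an early-returning reverse search for the last matching key.
import Mathlib
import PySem

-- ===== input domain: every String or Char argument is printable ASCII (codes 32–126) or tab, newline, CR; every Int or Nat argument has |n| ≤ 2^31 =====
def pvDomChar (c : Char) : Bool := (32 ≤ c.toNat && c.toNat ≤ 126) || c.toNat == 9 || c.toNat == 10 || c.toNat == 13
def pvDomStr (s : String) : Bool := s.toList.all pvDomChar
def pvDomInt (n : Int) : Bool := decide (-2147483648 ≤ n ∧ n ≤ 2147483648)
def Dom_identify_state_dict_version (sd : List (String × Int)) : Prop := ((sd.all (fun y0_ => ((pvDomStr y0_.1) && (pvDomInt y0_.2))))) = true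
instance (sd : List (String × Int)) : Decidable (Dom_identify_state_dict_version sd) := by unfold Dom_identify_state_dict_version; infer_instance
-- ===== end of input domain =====

-- B scans the dict items in reverse and returns at the first (i.e. last-in-order) matching key,
-- instead of A's forward full scan overriding a version variable.

-- ===== PORT A =====
def identify_state_dict_version (sd : List (String × Int)) : Option String :=
  sd.foldl (fun version kv =>
    if PySem.Str.isIn "wav_encoder.model" kv.1 then some "1"
    else if PySem.Str.isIn "wav_encoder.encoder" kv.1 then some "2"
    else version) none

-- ===== PORT B =====
def pvRevScan : List (String × Int) → Option String
  | [] => none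
  | kv :: rest =>
    if PySem.Str.isIn "wav_encoder.model" kv.1 then some "1"
    else if PySem.Str.isIn "wav_encoder.encoder" kv.1 then some "2"
    else pvRevScan rest

def identify_state_dict_version_alt (sd : List (String × Int)) : Option String :=
  pvRevScan sd.reverse

-- ===== PRECONDITION & SPEC =====
def Spec_identify_state_dict_version (sd : List (String × Int)) (out : Option String) : Prop := out = identify_state_dict_version_alt sd
instance (sd : List (String × Int)) (out : Option String) : Decidable (Spec_identify_state_dict_version sd out) := by unfold Spec_identify_state_dict_version; infer_instance

-- ===== CLAIM (what is proved, stated in full; the proofs are below) =====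
def Claim_equal_identify_state_dict_version : Prop := ∀ (sd : List (String × Int)), Dom_identify_state_dict_version sd → Spec_identify_state_dict_version sd (identify_state_dict_version sd)

-- ===== LEMMAS AND PROOFS =====

theorem pvRevScan_append (l : List (String × Int)) (x : String × Int) :
    pvRevScan (l ++ [x]) = ((pvRevScan l).or (pvRevScan [x])) := by
  induction l with
  | nil => simp [pvRevScan]
  | cons kv rest ih =>
    simp only [List.cons_append, pvRevScan, ih]
    split_ifs <;> simp

theorem foldl_eq_revScan (sd : List (String × Int)) (acc : Option String) :
    sd.foldl (fun version kv =>
      if PySem.Str.isIn "wav_encoder.model" kv.1 then some "1"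
      else if PySem.Str.isIn "wav_encoder.encoder" kv.1 then some "2"
      else version) acc = (match pvRevScan sd.reverse with | some v => some v | none => acc) := by
  induction sd generalizing acc with
  | nil => simp [pvRevScan]
  | cons kv rest ih =>
    simp only [List.foldl_cons, List.reverse_cons, ih, pvRevScan_append]
    cases pvRevScan rest.reverse with
    | some v => simp
    | none => simp [pvRevScan]; split_ifs <;> simp

-- ===== VERDICT (by name: the statement is the Claim_ definition above) =====
theorem identify_state_dict_version_spec : Claim_equal_identify_state_dict_version := by
  intro sd _
  show identify_state_dict_version sd = identify_state_dict_version_alt sd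
  unfold identify_state_dict_version identify_state_dict_version_alt
  rw [foldl_eq_revScan]
  cases pvRevScan sd.reverse <;> simp
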